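-- pv_equiv track=rewrite | github.com/x3asarc/vektal | src/api/v1/chat/bulk.py | fair_chunk_order
-- ===== SOURCE A (Python) =====
-- from typing import Any
--
-- def fair_chunk_order(chunks: list[dict[str, Any]]) -> list[dict[str, Any]]:
--     """
--     Interleave heavier and lighter chunks to avoid starvation under mixed durations.
--
--     This is a deterministic ordering heuristic used before queueing/executing chunk work.
--     """
--     heavy: list[dict[str, Any]] = []
--     light: list[dict[str, Any]] = []
--     for chunk in chunks:
--         sku_count = len(chunk.get("skus") or [])
--         if sku_count > 50:
--             heavy.append(chunk)
--         else:
--             light.append(chunk)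
--
--     ordered: list[dict[str, Any]] = []
--     while heavy or light:
--         if heavy:
--             ordered.append(heavy.pop(0))
--         if light:
--             ordered.append(light.pop(0))
--     return ordered
-- ===== SOURCE B (Python) =====
-- def fair_chunk_order(chunks):
--     """Tag each chunk with a sort key (2*rank for heavy, 2*rank+1 for light,
--     rank counted within its own group) and stable-sort once by that key."""
--     heavy_seen = 0
--     light_seen = 0
--     tagged = []
--     for chunk in chunks:
--         if len(chunk.get("skus") or []) > 50:
--             tagged.append((2 * heavy_seen, chunk))
--             heavy_seen += 1
--         else:
--             tagged.append((2 * light_seen + 1, chunk))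
--             light_seen += 1
--     tagged.sort(key=lambda t: t[0])
--     return [chunk for _, chunk in tagged]
-- ===== Notes on version B (the rewrite author's own statement) =====
-- stated objective: alternative
-- what changed: Replaces the two-queue pop(0) interleaving loop by a computed integer sort key (2*rank for heavy, 2*rank+1 for light, rank counted within each group) and a single stable sort that yields the same round-by-round order.
import Mathlib
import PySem

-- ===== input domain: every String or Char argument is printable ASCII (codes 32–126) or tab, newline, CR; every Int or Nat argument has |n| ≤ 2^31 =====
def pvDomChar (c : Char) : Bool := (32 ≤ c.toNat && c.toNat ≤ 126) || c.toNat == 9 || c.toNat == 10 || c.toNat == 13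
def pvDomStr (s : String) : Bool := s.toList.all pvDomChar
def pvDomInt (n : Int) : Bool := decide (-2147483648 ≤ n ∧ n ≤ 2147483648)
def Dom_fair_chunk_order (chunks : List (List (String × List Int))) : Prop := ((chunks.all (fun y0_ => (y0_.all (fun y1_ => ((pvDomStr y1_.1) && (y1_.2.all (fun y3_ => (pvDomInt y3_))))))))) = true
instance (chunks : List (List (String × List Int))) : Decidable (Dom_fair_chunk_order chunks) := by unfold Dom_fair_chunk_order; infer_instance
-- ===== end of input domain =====

-- B replaces A's two-queue pop(0) interleaving loop by tagging each chunk with an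
-- integer sort key (2*rank for heavy, 2*rank+1 for light, rank within its group)
-- and one stable sort: a different decomposition of the same ordering (return values proved equal).


-- ===== PORT A =====
-- sku_count = len(chunk.get("skus") or [])  ('or []' only turns None/[] into [], so the length is exact)
def pvSkuCount (chunk : List (String × List Int)) : Nat :=
  (((PySem.Dict.mk chunk).get? "skus").getD []).length

-- the 'while heavy or light' loop with its two 'if … pop(0) … append' steps
def pvWhileA (heavy light ordered : List (List (String × List Int))) :
    List (List (String × List Int)) :=
  match heavy, light with
  | [], [] => ordered
  | h :: hs, [] => pvWhileA hs [] (ordered ++ [h])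
  | [], l :: ls => pvWhileA [] ls (ordered ++ [l])
  | h :: hs, l :: ls => pvWhileA hs ls (ordered ++ [h] ++ [l])

def fair_chunk_order (chunks : List (List (String × List Int))) : List (List (String × List Int)) :=
  let hl := chunks.foldl
    (fun (hl : List (List (String × List Int)) × List (List (String × List Int))) chunk =>
      if pvSkuCount chunk > 50 then (hl.1 ++ [chunk], hl.2) else (hl.1, hl.2 ++ [chunk]))
    ([], [])
  pvWhileA hl.1 hl.2 []

-- ===== PORT B =====
def fair_chunk_order_alt (chunks : List (List (String × List Int))) : List (List (String × List Int)) :=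
  let st := chunks.foldl
    (fun (st : List (Int × List (String × List Int)) × Int × Int) chunk =>
      if pvSkuCount chunk > 50 then
        (st.1 ++ [(2 * st.2.1, chunk)], st.2.1 + 1, st.2.2)
      else
        (st.1 ++ [(2 * st.2.2 + 1, chunk)], st.2.1, st.2.2 + 1))
    ([], 0, 0)
  (PySem.List.sorted st.1 (fun t => t.1)).map (fun t => t.2)

-- ===== PRECONDITION & SPEC =====
def Spec_fair_chunk_order (chunks : List (List (String × List Int))) (out : List (List (String × List Int))) : Prop := out = fair_chunk_order_alt chunks
instance (chunks : List (List (String × List Int))) (out : List (List (String × List Int))) : Decidable (Spec_fair_chunk_order chunks out) := by unfold Spec_fair_chunk_order; infer_instance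

-- ===== CLAIM (what is proved, stated in full; the proofs are below) =====
def Claim_equal_fair_chunk_order : Prop := ∀ (chunks : List (List (String × List Int))), Dom_fair_chunk_order chunks → Spec_fair_chunk_order chunks (fair_chunk_order chunks)

-- ===== LEMMAS AND PROOFS =====

-- the heavy/light test as a Bool
def pvHeavy (chunk : List (String × List Int)) : Bool := pvSkuCount chunk > 50

-- B's tagged list, written as a recursion with the two counters
def pvTag (chunks : List (List (String × List Int))) (h l : Int) :
    List (Int × List (String × List Int)) :=
  match chunks with
  | [] => []
  | c :: cs => if pvHeavy c then (2 * h, c) :: pvTag cs (h + 1) l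
               else (2 * l + 1, c) :: pvTag cs h (l + 1)

-- the round-by-round interleave of tagged heavies and lights, keys strictly increasing
def pvMix (hs ls : List (List (String × List Int))) (i : Int) :
    List (Int × List (String × List Int)) :=
  match hs, ls with
  | [], [] => []
  | h :: hs, [] => (2 * i, h) :: pvMix hs [] (i + 1)
  | [], l :: ls => (2 * i + 1, l) :: pvMix [] ls (i + 1)
  | h :: hs, l :: ls => (2 * i, h) :: (2 * i + 1, l) :: pvMix hs ls (i + 1)

def pvTagH (hs : List (List (String × List Int))) (i : Int) :
    List (Int × List (String × List Int)) :=
  match hs with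
  | [] => []
  | h :: hs => (2 * i, h) :: pvTagH hs (i + 1)

def pvTagL (ls : List (List (String × List Int))) (i : Int) :
    List (Int × List (String × List Int)) :=
  match ls with
  | [] => []
  | l :: ls => (2 * i + 1, l) :: pvTagL ls (i + 1)

theorem pvWhileA_nil (ls ordered : List (List (String × List Int))) :
    pvWhileA [] ls ordered = ordered ++ ls := by
  induction ls generalizing ordered with
  | nil => simp [pvWhileA]
  | cons l ls ih => simp [pvWhileA, ih]

theorem pvMix_nil_map (ls : List (List (String × List Int))) (i : Int) :
    (pvMix [] ls i).map (fun t => t.2) = ls := by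
  induction ls generalizing i with
  | nil => simp [pvMix]
  | cons l ls ih => simp only [pvMix, List.map_cons, ih]

theorem map_snd_pvMix (hs : List (List (String × List Int))) :
    ∀ (ls ordered : List (List (String × List Int))) (i : Int),
      pvWhileA hs ls ordered = ordered ++ (pvMix hs ls i).map (fun t => t.2) := by
  induction hs with
  | nil =>
      intro ls ordered i
      rw [pvWhileA_nil, pvMix_nil_map]
  | cons h hs ih =>
      intro ls ordered i
      cases ls with
      | nil => simp only [pvWhileA, pvMix, ih [] _ (i + 1), List.map_cons,
          List.append_assoc, List.singleton_append]
      | cons l ls => simp only [pvWhileA, pvMix, ih ls _ (i + 1), List.map_cons,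
          List.append_assoc, List.cons_append, List.nil_append]

theorem pvMix_nil_eq_tagL (ls : List (List (String × List Int))) (i : Int) :
    pvMix [] ls i = pvTagL ls i := by
  induction ls generalizing i with
  | nil => simp [pvMix, pvTagL]
  | cons l ls ih => simp only [pvMix, pvTagL, ih]

theorem pvMix_perm (hs : List (List (String × List Int))) :
    ∀ (ls : List (List (String × List Int))) (i : Int),
      (pvMix hs ls i).Perm (pvTagH hs i ++ pvTagL ls i) := by
  induction hs with
  | nil =>
      intro ls i
      rw [pvMix_nil_eq_tagL]
      simp [pvTagH]
  | cons h hs ih =>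
      intro ls i
      cases ls with
      | nil =>
          simp only [pvMix, pvTagH, pvTagL, List.append_nil]
          exact (by simpa [pvTagL] using ih [] (i + 1) : (pvMix hs [] (i+1)).Perm (pvTagH hs (i+1))).cons _
      | cons l ls =>
          simp only [pvMix, pvTagH, pvTagL, List.cons_append]
          exact ((((ih ls (i + 1)).cons ((2 * i + 1, l))).trans List.perm_middle.symm).cons _)

theorem pvTag_perm (chunks : List (List (String × List Int))) (h l : Int) :
    (pvTag chunks h l).Perm
      (pvTagH (chunks.filter pvHeavy) h ++ pvTagL (chunks.filter (fun c => ¬ pvHeavy c)) l) := by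
  induction chunks generalizing h l with
  | nil => simp [pvTag, pvTagH, pvTagL]
  | cons c cs ih =>
      by_cases hc : pvHeavy c
      · simpa [pvTag, hc, List.filter_cons, pvTagH] using (ih (h + 1) l).cons ((2 * h, c))
      · have step : ((2 * l + 1, c) :: pvTag cs h (l + 1)).Perm
            (pvTagH (cs.filter pvHeavy) h ++ (2 * l + 1, c) :: pvTagL (cs.filter (fun c => ¬ pvHeavy c)) (l + 1)) :=
          ((ih h (l + 1)).cons _).trans List.perm_middle.symm
        simpa [pvTag, hc, List.filter_cons, pvTagL] using step

theorem pvMix_key_lb (hs : List (List (String × List Int))) :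
    ∀ (ls : List (List (String × List Int))) (i : Int),
      ∀ t ∈ pvMix hs ls i, 2 * i ≤ t.1 := by
  induction hs with
  | nil =>
      intro ls
      induction ls with
      | nil => simp [pvMix]
      | cons l ls ih =>
          intro i t ht
          simp only [pvMix, List.mem_cons] at ht
          rcases ht with rfl | ht
          · omega
          · have := ih (i + 1) t ht; omega
  | cons h hs ih =>
      intro ls i t ht
      cases ls with
      | nil =>
          simp only [pvMix, List.mem_cons] at ht
          rcases ht with rfl | ht
          · omega
          · have := ih [] (i + 1) t ht; omega
      | cons l ls =>
          simp only [pvMix, List.mem_cons] at ht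
          rcases ht with rfl | rfl | ht
          · omega
          · omega
          · have := ih ls (i + 1) t ht; omega

theorem pvMix_pairwise (hs : List (List (String × List Int))) :
    ∀ (ls : List (List (String × List Int))) (i : Int),
      (pvMix hs ls i).Pairwise (fun a b => a.1 < b.1) := by
  induction hs with
  | nil =>
      intro ls
      induction ls with
      | nil => simp [pvMix]
      | cons l ls ih =>
          intro i
          simp only [pvMix]
          exact List.Pairwise.cons
            (fun t ht => by have := pvMix_key_lb [] ls (i + 1) t ht; omega) (ih (i + 1))
  | cons h hs ih =>
      intro ls i
      cases ls with
      | nil =>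
          simp only [pvMix]
          exact List.Pairwise.cons
            (fun t ht => by have := pvMix_key_lb hs [] (i + 1) t ht; omega) (ih [] (i + 1))
      | cons l ls =>
          simp only [pvMix]
          refine List.Pairwise.cons (fun t ht => ?_) (List.Pairwise.cons (fun t ht => ?_) (ih ls (i + 1)))
          · simp only [List.mem_cons] at ht
            rcases ht with rfl | ht
            · omega
            · have := pvMix_key_lb hs ls (i + 1) t ht; omega
          · have := pvMix_key_lb hs ls (i + 1) t ht; omega

-- A's first loop computes the two filters
theorem foldA_eq (chunks : List (List (String × List Int)))
    (acc1 acc2 : List (List (String × List Int))) :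
    chunks.foldl
      (fun (hl : List (List (String × List Int)) × List (List (String × List Int))) chunk =>
        if pvSkuCount chunk > 50 then (hl.1 ++ [chunk], hl.2) else (hl.1, hl.2 ++ [chunk]))
      (acc1, acc2)
    = (acc1 ++ chunks.filter pvHeavy, acc2 ++ chunks.filter (fun c => ¬ pvHeavy c)) := by
  induction chunks generalizing acc1 acc2 with
  | nil => simp
  | cons c cs ih =>
      by_cases hc : pvHeavy c
      · have hc' : pvSkuCount c > 50 := by simpa [pvHeavy] using hc
        simp [List.foldl_cons, hc', ih, hc]
      · have hc' : ¬ pvSkuCount c > 50 := by simpa [pvHeavy] using hc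
        simp [List.foldl_cons, hc', ih, hc]

-- B's loop computes pvTag with its two counters
theorem foldB_eq (chunks : List (List (String × List Int)))
    (acc : List (Int × List (String × List Int))) (h l : Int) :
    chunks.foldl
      (fun (st : List (Int × List (String × List Int)) × Int × Int) chunk =>
        if pvSkuCount chunk > 50 then
          (st.1 ++ [(2 * st.2.1, chunk)], st.2.1 + 1, st.2.2)
        else
          (st.1 ++ [(2 * st.2.2 + 1, chunk)], st.2.1, st.2.2 + 1))
      (acc, h, l)
    = (acc ++ pvTag chunks h l,
       h + ((chunks.filter pvHeavy).length : Int),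
       l + ((chunks.filter (fun c => ¬ pvHeavy c)).length : Int)) := by
  induction chunks generalizing acc h l with
  | nil => simp [pvTag]
  | cons c cs ih =>
      by_cases hc : pvHeavy c
      · have hc' : pvSkuCount c > 50 := by simpa [pvHeavy] using hc
        simp [List.foldl_cons, hc', ih, pvTag, hc]
        omega
      · have hc' : ¬ pvSkuCount c > 50 := by simpa [pvHeavy] using hc
        simp [List.foldl_cons, hc', ih, pvTag, hc]
        omega

-- ===== VERDICT (by name: the statement is the Claim_ definition above) =====
theorem fair_chunk_order_spec : Claim_equal_fair_chunk_order := by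
  intro chunks _
  unfold Spec_fair_chunk_order fair_chunk_order fair_chunk_order_alt
  rw [foldA_eq, foldB_eq]
  simp only [List.nil_append]
  have hsorted : PySem.List.sorted (pvTag chunks 0 0) (fun t => t.1)
      = pvMix (chunks.filter pvHeavy) (chunks.filter (fun c => ¬ pvHeavy c)) 0 := by
    apply PySem.List.sorted_eq_of_perm_of_pairwise_lt
    · exact (pvMix_perm _ _ 0).trans (pvTag_perm chunks 0 0).symm
    · exact pvMix_pairwise _ _ 0
  rw [hsorted, map_snd_pvMix _ _ _ 0]
  simp
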